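-- pv_equiv track=rewrite | github.com/Quelklef/gin-bots | bots/simple/bot.py | calculate_other_hand
-- ===== SOURCE A (Python) =====
-- def calculate_other_hand(history):
--   """ From a history, calculate the cards that are definitely in the other player's hand
--   Assumes that the current turn is 'our' turn. """
--
--   # whose turn was the first turn
--   their_turn = len(history) % 2 == 0
--
--   their_hand = set()
--
--   # discard pile
--   discard = []
--
--   # emulate game
--   for draw_choice, discard_choice in history:
--     if draw_choice == 'discard':
--       card = discard.pop()
--       if their_turn:
--         their_hand.add(card)
--
--     if their_turn:
--       their_hand.discard(discard_choice)
--
--     discard.append(discard_choice)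
--     their_turn = not their_turn
--
--   return their_hand
-- ===== SOURCE B (Python) =====
-- def calculate_other_hand(history):
--   """ From a history, calculate the cards that are definitely in the other player's hand
--   Assumes that the current turn is 'our' turn. """
--
--   # whose turn was the first turn
--   their_first = len(history) % 2 == 0
--
--   their_hand = set()
--
--   # no discard pile needed: a card drawn from the discard pile on turn i is
--   # always the card discarded on turn i-1; only their turns can change their hand
--   for i, (draw_choice, discard_choice) in enumerate(history):
--     if (i % 2 == 0) == their_first:
--       if draw_choice == 'discard' and i > 0:
--         their_hand.add(history[i - 1][1])
--       their_hand.discard(discard_choice)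
--
--   return their_hand
-- ===== Notes on version B (the rewrite author's own statement) =====
-- stated objective: simpler
-- what changed: B drops A's emulated discard pile and alternating turn flag: it selects the opponent's turns by index parity over enumerate(history) and reads a drawn card directly as the previous entry's discard via positional lookup, maintaining only the hand set.
import Mathlib
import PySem

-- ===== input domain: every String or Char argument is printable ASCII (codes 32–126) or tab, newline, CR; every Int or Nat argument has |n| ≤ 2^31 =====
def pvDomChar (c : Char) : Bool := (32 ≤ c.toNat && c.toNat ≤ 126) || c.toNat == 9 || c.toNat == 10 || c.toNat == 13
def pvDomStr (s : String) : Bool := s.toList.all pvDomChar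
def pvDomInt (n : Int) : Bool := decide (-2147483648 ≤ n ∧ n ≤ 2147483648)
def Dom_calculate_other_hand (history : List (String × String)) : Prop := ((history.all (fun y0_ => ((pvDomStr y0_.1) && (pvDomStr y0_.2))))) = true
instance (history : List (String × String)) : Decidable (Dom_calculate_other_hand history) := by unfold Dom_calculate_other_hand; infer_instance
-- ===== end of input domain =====

-- B drops A's emulated discard pile and alternating turn flag: it filters turns by index
-- parity and reads a drawn card as the previous entry's discard by positional lookup
-- (objective: simpler; return-value equivalence — neither program mutates its argument).

-- ===== PORT A =====
-- one iteration of A's loop body; state = (their_turn, their_hand, discard); none = IndexError from discard.pop()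
def pvStepA (st : Option (Bool × PySem.Set String × List String)) (e : String × String) :
    Option (Bool × PySem.Set String × List String) :=
  match st with
  | none => none
  | some (tt, hand, discard) =>
    match (if e.1 == "discard" then
             match PySem.List.pop? discard with   -- discard.pop(); none = IndexError
             | none => none
             | some (card, rest) => some ((if tt then PySem.Set.add hand card else hand), rest)
           else some (hand, discard)) with
    | none => none
    | some (hand, discard) =>
      some (!tt, (if tt then PySem.Set.discard hand e.2 else hand), discard ++ [e.2])

def calculate_other_hand (history : List (String × String)) : List String :=
  let their_turn : Bool := history.length % 2 == 0
  match history.foldl pvStepA (some (their_turn, PySem.Set.empty, [])) with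
  | some (_, hand, _) => hand
  | none => []   -- unreachable under Pre_ (A raises IndexError there)

-- ===== PORT B =====
-- one iteration of B's loop body over enumerate(history)
def pvStepB (history : List (String × String)) (tf : Bool) (hand : PySem.Set String)
    (p : Int × (String × String)) : PySem.Set String :=
  if (PySem.Int.mod p.1 2 == 0) == tf then
    let hand := if p.2.1 == "discard" && decide (0 < p.1) then
        match PySem.List.pyGet? history (p.1 - 1) with
        | some q => PySem.Set.add hand q.2
        | none => hand   -- unreachable: 0 < i < len(history)
      else hand
    PySem.Set.discard hand p.2.2
  else hand

def calculate_other_hand_alt (history : List (String × String)) : List String :=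
  let their_first : Bool := history.length % 2 == 0
  (PySem.List.enumerate history 0).foldl (pvStepB history their_first) PySem.Set.empty

-- ===== PRECONDITION & SPEC =====
-- Pre_ excludes exactly the histories whose FIRST entry draws from the (empty) discard pile:
-- there A's `discard.pop()` raises IndexError.
def Pre_calculate_other_hand (history : List (String × String)) : Prop :=
  (history.head?.all (fun e => !(e.1 == "discard"))) = true
instance (history : List (String × String)) : Decidable (Pre_calculate_other_hand history) := by unfold Pre_calculate_other_hand; infer_instance

def pvWitness_calculate_other_hand : (List (String × String)) :=
  [("deck", "a"), ("discard", "a")]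

def Spec_calculate_other_hand (history : List (String × String)) (out : List String) : Prop := out = calculate_other_hand_alt history
instance (history : List (String × String)) (out : List String) : Decidable (Spec_calculate_other_hand history out) := by unfold Spec_calculate_other_hand; infer_instance

-- ===== CLAIM (what is proved, stated in full; the proofs are below) =====
def Claim_equal_calculate_other_hand : Prop := ∀ (history : List (String × String)), Dom_calculate_other_hand history → Pre_calculate_other_hand history → Spec_calculate_other_hand history (calculate_other_hand history)


-- ===== LEMMAS AND PROOFS =====

-- the turn flag at index i+1 is the negation of the flag at index i
lemma pvParity (i : Int) (tf : Bool) :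
    ((PySem.Int.mod (i + 1) 2 == 0) == tf) = !((PySem.Int.mod i 2 == 0) == tf) := by
  rw [PySem.Int.mod_eq_emod_of_pos (b := 2) (by norm_num),
      PySem.Int.mod_eq_emod_of_pos (b := 2) (by norm_num)]
  have h : (i + 1) % 2 = 0 ↔ ¬ i % 2 = 0 := by omega
  by_cases hi : i % 2 = 0 <;> cases tf <;> simp [hi, h] <;> simp [h.mpr hi] <;> omega

-- joint loop invariant: running A's loop over the remaining turns l (with pre already
-- processed: turn flag = parity of pre.length, pile s ends in pre's last discard) computes
-- the same hand as running B's loop over enumerate l starting at index pre.length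
lemma pvMain (history : List (String × String)) (tf : Bool) :
    ∀ (l pre : List (String × String)) (hand : PySem.Set String) (s : List String),
    history = pre ++ l →
    (pre = [] → s = [] ∧ (∀ e l', l = e :: l' → e.1 ≠ "discard")) →
    (∀ e, pre.getLast? = some e → ∃ s₀, s = s₀ ++ [e.2]) →
    (match l.foldl pvStepA (some (((PySem.Int.mod (pre.length : Int) 2 == 0) == tf), hand, s)) with
     | some (_, h, _) => h
     | none => []) =
    (PySem.List.enumerate l (pre.length : Int)).foldl (pvStepB history tf) hand := by
  intro l
  induction l with
  | nil => intro pre hand s _ _ _; rfl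
  | cons e l' ih =>
    intro pre hand s hhist hpre hlast
    rw [PySem.List.enumerate_cons, List.foldl_cons, List.foldl_cons]
    by_cases he : e.1 = "discard"
    · -- draw from the discard pile
      rcases List.eq_nil_or_concat pre with rfl | ⟨pre₀, e', rfl⟩
      · exact absurd he ((hpre rfl).2 e l' rfl)
      · simp only [List.concat_eq_append] at hhist hlast ⊢
        obtain ⟨s₀, rfl⟩ := hlast e' (by simp)
        have hhist' : history = pre₀ ++ e' :: (e :: l') := by simpa using hhist
        have hpos : (0 : Int) < ((pre₀ ++ [e']).length : Int) := by
          simp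
        have hidx : (((pre₀ ++ [e']).length : Nat) : Int) - 1 = ((pre₀.length : Nat) : Int) := by
          push_cast [List.length_append, List.length_cons, List.length_nil]; ring
        have hget : PySem.List.pyGet? history ((((pre₀ ++ [e']).length : Nat) : Int) - 1)
            = some e' := by
          rw [hidx, hhist']; exact PySem.List.pyGet?_append_length _ _ _
        have he2 : (e.1 == "discard") = true := by simpa using he
        have hA : pvStepA (some (((PySem.Int.mod ((pre₀ ++ [e']).length : Int) 2 == 0) == tf), hand, s₀ ++ [e'.2])) e
            = some (!((PySem.Int.mod ((pre₀ ++ [e']).length : Int) 2 == 0) == tf),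
                (if ((PySem.Int.mod ((pre₀ ++ [e']).length : Int) 2 == 0) == tf) then
                   PySem.Set.discard (PySem.Set.add hand e'.2) e.2
                 else hand), s₀ ++ [e.2]) := by
          simp [pvStepA, he2, PySem.List.pop?_last]
          split_ifs <;> rfl
        have hget2 : history[pre₀.length]? = some e' := by
          rw [hhist', List.getElem?_append_right (le_refl _)]; simp
        have hB : pvStepB history tf hand ((((pre₀ ++ [e']).length : Nat) : Int), e)
            = (if ((PySem.Int.mod ((pre₀ ++ [e']).length : Int) 2 == 0) == tf) then
                 PySem.Set.discard (PySem.Set.add hand e'.2) e.2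
               else hand) := by
          simp [pvStepB, he2, hget2]
        rw [hA, hB]
        have hnext := ih ((pre₀ ++ [e']) ++ [e])
          (if ((PySem.Int.mod ((pre₀ ++ [e']).length : Int) 2 == 0) == tf) then
             PySem.Set.discard (PySem.Set.add hand e'.2) e.2
           else hand) (s₀ ++ [e.2])
          (by simpa using hhist)
          (by simp)
          (by intro x hx; simp at hx; exact ⟨s₀, by rw [hx]⟩)
        have hcast : (((pre₀ ++ [e']) ++ [e]).length : Int) = (((pre₀ ++ [e']).length : Nat) : Int) + 1 := by
          push_cast [List.length_append, List.length_cons, List.length_nil]; ring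
        rw [hcast, pvParity] at hnext
        exact hnext
    · -- draw from the deck
      have he2 : (e.1 == "discard") = false := by simpa using he
      have hA : pvStepA (some (((PySem.Int.mod ((pre.length : Nat) : Int) 2 == 0) == tf), hand, s)) e
          = some (!((PySem.Int.mod ((pre.length : Nat) : Int) 2 == 0) == tf),
              (if ((PySem.Int.mod ((pre.length : Nat) : Int) 2 == 0) == tf) then
                 PySem.Set.discard hand e.2
               else hand), s ++ [e.2]) := by
        simp [pvStepA, he2]
      have hB : pvStepB history tf hand (((pre.length : Nat) : Int), e)
          = (if ((PySem.Int.mod ((pre.length : Nat) : Int) 2 == 0) == tf) then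
               PySem.Set.discard hand e.2
             else hand) := by
        rw [pvStepB]
        by_cases htt : ((PySem.Int.mod ((pre.length : Nat) : Int) 2 == 0) == tf) = true <;>
          simp only [htt, if_true, if_false, Bool.false_eq_true, he2, Bool.false_and]
      rw [hA, hB]
      have hnext := ih (pre ++ [e])
        (if ((PySem.Int.mod ((pre.length : Nat) : Int) 2 == 0) == tf) then
           PySem.Set.discard hand e.2
         else hand) (s ++ [e.2])
        (by simpa using hhist)
        (by simp)
        (by intro x hx; simp at hx; exact ⟨s, by rw [hx]⟩)
      have hcast : ((pre ++ [e]).length : Int) = ((pre.length : Nat) : Int) + 1 := by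
        push_cast [List.length_append, List.length_cons, List.length_nil]; ring
      rw [hcast, pvParity] at hnext
      exact hnext

-- ===== VERDICT (by name: the statement is the Claim_ definition above) =====
theorem calculate_other_hand_spec : Claim_equal_calculate_other_hand := by
  intro history _ hpre
  unfold Spec_calculate_other_hand calculate_other_hand calculate_other_hand_alt
  have hmain := pvMain history (history.length % 2 == 0) history [] PySem.Set.empty []
    rfl
    (by
      refine fun _ => ⟨rfl, fun e l' hl => ?_⟩
      unfold Pre_calculate_other_hand at hpre
      subst hl; simpa using hpre)
    (by intro e he; simp at he)
  simpa using hmain
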